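-- pv_equiv track=rewrite | github.com/baicai-1145/GPT-SoVITS-ANE | GPT_SoVITS/TTS_infer_pack/pause_splitter.py | _match_right_prefix
-- ===== SOURCE A (Python) =====
-- def _match_right_prefix(text: str, split_index: int, keywords: set[str]) -> str | None:
--     if not keywords:
--         return None
--     right_text = text[split_index:]
--     for keyword in sorted(keywords, key=len, reverse=True):
--         if right_text.startswith(keyword):
--             return keyword
--     return None
-- ===== SOURCE B (Python) =====
-- def _match_right_prefix(text: str, split_index: int, keywords: set[str]) -> str | None:
--     right_text = text[split_index:]
--     for length in sorted({len(k) for k in keywords}, reverse=True):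
--         candidate = right_text[:length]
--         if candidate in keywords:
--             return candidate
--     return None
-- ===== Notes on version B (the rewrite author's own statement) =====
-- stated objective: alternative
-- what changed: B iterates over the distinct keyword lengths in descending order and hash-looks-up the slice right_text[:L] in the set, instead of sorting all keywords by length and scanning them with startswith; the empty-set guard disappears.
import Mathlib
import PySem

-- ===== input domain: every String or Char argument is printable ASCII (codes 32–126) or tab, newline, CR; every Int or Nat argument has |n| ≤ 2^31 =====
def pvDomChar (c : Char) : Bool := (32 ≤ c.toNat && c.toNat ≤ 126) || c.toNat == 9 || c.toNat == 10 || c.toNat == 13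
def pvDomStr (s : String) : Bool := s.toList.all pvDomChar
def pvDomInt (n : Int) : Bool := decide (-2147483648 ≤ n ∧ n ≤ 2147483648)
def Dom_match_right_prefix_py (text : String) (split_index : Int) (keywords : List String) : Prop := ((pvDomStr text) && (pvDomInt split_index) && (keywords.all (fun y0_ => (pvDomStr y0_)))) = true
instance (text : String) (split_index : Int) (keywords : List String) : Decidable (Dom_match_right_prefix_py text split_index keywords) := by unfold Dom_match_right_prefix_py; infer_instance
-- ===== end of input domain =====

-- B replaces A's startswith-scan over the length-sorted keywords by a loop over the distinct
-- keyword lengths in descending order that looks the slice right_text[:L] up in the keyword set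
-- (alternative decomposition; the return value is proved identical).

-- ===== PORT A =====
def match_right_prefix_py (text : String) (split_index : Int) (keywords : List String) : Option String :=
  if keywords = [] then none
  else
    let right_text := PySem.Str.slice text (some split_index) none
    List.find? (fun keyword => PySem.Str.startswith right_text keyword)
      (PySem.List.sorted keywords (fun k => PySem.Str.len k) true)

-- ===== PORT B =====
def match_right_prefix_py_alt (text : String) (split_index : Int) (keywords : List String) : Option String :=
  let right_text := PySem.Str.slice text (some split_index) none
  (PySem.List.sorted (PySem.Set.ofList (keywords.map (fun k => PySem.Str.len k))) (fun x => x) true).findSome?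
    (fun length =>
      let candidate := PySem.Str.slice right_text none (some length)
      if keywords.contains candidate then some candidate else none)

-- ===== PRECONDITION & SPEC =====
def Spec_match_right_prefix_py (text : String) (split_index : Int) (keywords : List String) (out : Option String) : Prop := out = match_right_prefix_py_alt text split_index keywords
instance (text : String) (split_index : Int) (keywords : List String) (out : Option String) : Decidable (Spec_match_right_prefix_py text split_index keywords out) := by unfold Spec_match_right_prefix_py; infer_instance

-- ===== CLAIM (what is proved, stated in full; the proofs are below) =====
def Claim_equal_match_right_prefix_py : Prop := ∀ (text : String) (split_index : Int) (keywords : List String), Dom_match_right_prefix_py text split_index keywords → Spec_match_right_prefix_py text split_index keywords (match_right_prefix_py text split_index keywords)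

-- ===== LEMMAS AND PROOFS =====

-- findSome? over a strictly descending Int list: if f x = some v and every element larger
-- than x maps to none or some v, the scan returns some v.
theorem findSome?_desc {β : Type} (f : Int → Option β) (l : List Int) (x : Int) (v : β)
    (hp : l.Pairwise (fun a b => b < a)) (hx : x ∈ l) (hfx : f x = some v)
    (hbig : ∀ y ∈ l, x < y → f y = none ∨ f y = some v) :
    l.findSome? f = some v := by
  induction l with
  | nil => cases hx
  | cons a t ih =>
    rw [List.pairwise_cons] at hp
    rcases List.mem_cons.mp hx with rfl | hxt
    · simp [hfx]
    · have hax : x < a := hp.1 x hxt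
      rcases hbig a List.mem_cons_self hax with h | h
      · rw [List.findSome?_cons, h]
        exact ih hp.2 hxt (fun y hy => hbig y (List.mem_cons_of_mem a hy))
      · simp [h]

theorem startswith_iff_take (rt k : String) :
    PySem.Str.startswith rt k = true ↔ k.toList <+: rt.toList := by
  simp [PySem.Chars.startswith_iff]

theorem candidate_toList (rt : String) (n : Nat) :
    (PySem.Str.slice rt none (some (n : Int))).toList = rt.toList.take n := by
  simp [PySem.List.slice_to_natCast]

-- the distinct-length list B iterates over is strictly descending
theorem lens_pairwise (keywords : List String) :
    (PySem.List.sorted (PySem.Set.ofList (keywords.map (fun k => PySem.Str.len k))) (fun x => x) true).Pairwise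
      (fun a b => b < a) := by
  have hnd : (PySem.List.sorted (PySem.Set.ofList (keywords.map (fun k => PySem.Str.len k))) (fun x : Int => x) true).Nodup :=
    (PySem.List.sorted_perm _ _ _).nodup_iff.mpr (PySem.Set.nodup_ofList _)
  have hle := PySem.List.sorted_pairwise_rev (PySem.Set.ofList (keywords.map (fun k => PySem.Str.len k))) (fun x : Int => x)
  exact (hnd.and hle).imp (fun ⟨hne, hle⟩ => lt_of_le_of_ne hle (Ne.symm hne))

-- Main lemma, with the (shared) right text abstracted: A's scan equals B's scan.
set_option maxHeartbeats 1000000 in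
theorem key_lemma (rt : String) (keywords : List String) :
    List.find? (fun keyword => PySem.Str.startswith rt keyword)
      (PySem.List.sorted keywords (fun k => PySem.Str.len k) true)
    = (PySem.List.sorted (PySem.Set.ofList (keywords.map (fun k => PySem.Str.len k))) (fun x => x) true).findSome?
        (fun length =>
          let candidate := PySem.Str.slice rt none (some length)
          if keywords.contains candidate then some candidate else none) := by
  have hmemlens : ∀ L : Int, L ∈ PySem.List.sorted (PySem.Set.ofList (keywords.map (fun k => PySem.Str.len k))) (fun x : Int => x) true ↔
      ∃ k ∈ keywords, ((k.length : Int)) = L := by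
    intro L
    simp [PySem.List.mem_sorted, PySem.Set.mem_ofList, List.mem_map]
  cases hfind : List.find? (fun keyword => PySem.Str.startswith rt keyword)
      (PySem.List.sorted keywords (fun k => PySem.Str.len k) true) with
  | none =>
    rw [List.find?_eq_none] at hfind
    have hno : ∀ k ∈ keywords, ¬ (k.toList <+: rt.toList) := by
      intro k hk hp
      exact absurd ((startswith_iff_take rt k).mpr hp)
        (by simpa using hfind k ((PySem.List.mem_sorted _ _ _ _).mpr hk))
    symm
    rw [List.findSome?_eq_none_iff]
    intro L hL
    rcases (hmemlens L).mp hL with ⟨k', hk', rfl⟩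
    have hcf : keywords.contains (PySem.Str.slice rt none (some ((k'.length : Int)))) = false := by
      rw [Bool.eq_false_iff]; rw [ne_eq, List.contains_iff_mem]
      intro hmem
      exact hno _ hmem (by rw [candidate_toList]; exact List.take_prefix _ _)
    simp only [hcf]
    simp
  | some k =>
    rcases List.find?_eq_some_iff_append.mp hfind with ⟨hPk, as, bs, heq, has⟩
    have hPk' : k.toList <+: rt.toList := (startswith_iff_take rt k).mp hPk
    have hkmem : k ∈ keywords := by
      rw [← PySem.List.mem_sorted keywords (fun k => PySem.Str.len k) true, heq]
      exact List.mem_append_right _ List.mem_cons_self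
    -- k's length is maximal among the keywords that prefix rt
    have hmax : ∀ k' ∈ keywords, k'.toList <+: rt.toList → k'.length ≤ k.length := by
      intro k' hk' hp'
      have hk's : k' ∈ as ++ k :: bs := by
        rw [← heq]; exact (PySem.List.mem_sorted _ _ _ _).mpr hk'
      rcases List.mem_append.mp hk's with hin | hin
      · exact absurd ((startswith_iff_take rt k').mpr hp') (by simpa using has k' hin)
      · rcases List.mem_cons.mp hin with rfl | hin
        · exact le_refl _
        · have hpw := PySem.List.sorted_pairwise_rev keywords (fun k => PySem.Str.len k)
          rw [heq, List.pairwise_append] at hpw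
          have := (List.pairwise_cons.mp hpw.2.1).1 k' hin
          simpa using this
    have hkrt : k.length ≤ rt.length := by
      have := hPk'.length_le
      simpa [String.length_toList] using this
    symm
    apply findSome?_desc _ _ ((k.length : Int)) k (lens_pairwise keywords)
    · exact (hmemlens _).mpr ⟨k, hkmem, rfl⟩
    · have hceq : PySem.Str.slice rt none (some ((k.length : Int))) = k := by
        apply String.toList_inj.mp
        rw [candidate_toList, ← String.length_toList]
        exact (List.prefix_iff_eq_take.mp hPk').symm
      simp only [hceq]
      rw [if_pos (by rw [List.contains_iff_mem]; exact hkmem)]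
    · intro y hy hlt
      rcases (hmemlens y).mp hy with ⟨k', hk', rfl⟩
      by_cases hc : keywords.contains (PySem.Str.slice rt none (some ((k'.length : Int)))) = true
      · right
        have hcmem : PySem.Str.slice rt none (some ((k'.length : Int))) ∈ keywords := by
          rwa [List.contains_iff_mem] at hc
        have hct := candidate_toList rt k'.length
        have hcpre : (PySem.Str.slice rt none (some ((k'.length : Int)))).toList <+: rt.toList := by
          rw [hct]; exact List.take_prefix _ _
        have hcle := hmax _ hcmem hcpre
        have hklen : k.length < k'.length := by exact_mod_cast hlt
        have hclen : (PySem.Str.slice rt none (some ((k'.length : Int)))).length = min k'.length rt.length := by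
          rw [← String.length_toList, hct, List.length_take, String.length_toList]
        -- the candidate is all of rt, which must then be k itself
        have hceq : PySem.Str.slice rt none (some ((k'.length : Int))) = k := by
          apply String.toList_inj.mp
          rw [hct, List.take_of_length_le (by rw [String.length_toList]; omega)]
          have hk1 := List.prefix_iff_eq_take.mp hPk'
          rw [hk1, List.take_of_length_le (by rw [String.length_toList, String.length_toList]; omega)]
        simp only [hceq]
        rw [if_pos (by rw [List.contains_iff_mem]; exact hkmem)]
      · left
        simp only []
        rw [if_neg hc]

-- ===== VERDICT (by name: the statement is the Claim_ definition above) =====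
theorem match_right_prefix_py_spec : Claim_equal_match_right_prefix_py := by
  intro text split_index keywords _
  unfold Spec_match_right_prefix_py match_right_prefix_py match_right_prefix_py_alt
  by_cases h : keywords = []
  · subst h; simp [PySem.Set.ofList, PySem.List.sorted]
  · rw [if_neg h]
    exact key_lemma _ _
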